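-- pv_equiv track=rewrite | github.com/douymLab/PhyloSOLID | src/mutation_integrator.py | intersect_is_self
-- ===== SOURCE A (Python) =====
-- def intersect_is_self(v1, v0):
--     # If True, v1 is a subset of v0
--     v0_indices = [i for i, val in enumerate(v0) if val == 1]
--     v1_indices = [i for i, val in enumerate(v1) if val == 1]
--     v0_set = set(v0_indices)
--     v1_set = set(v1_indices)
--     if v1_set == v1_set.intersection(v0_set):
--         return True
--     else:
--         return False
-- ===== SOURCE B (Python) =====
-- def intersect_is_self(v1, v0):
--     # If True, v1 is a subset of v0: lockstep positional scan, no sets at all.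
--     # A position i with v1[i]==1 must also have i < len(v0) and v0[i]==1.
--     i = 0
--     n0 = len(v0)
--     for x in v1:
--         if x == 1 and (i >= n0 or v0[i] != 1):
--             return False
--         i += 1
--     return True
-- ===== Notes on version B (the rewrite author's own statement) =====
-- stated objective: faster
-- what changed: B does a single lockstep positional scan over v1 with an index into v0 (early-return on the first violating position), building no intermediate index lists or sets at all, instead of A's materializing both 1-index lists, converting them to sets, and comparing v1's set with its intersection with v0's.
import Mathlib
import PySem

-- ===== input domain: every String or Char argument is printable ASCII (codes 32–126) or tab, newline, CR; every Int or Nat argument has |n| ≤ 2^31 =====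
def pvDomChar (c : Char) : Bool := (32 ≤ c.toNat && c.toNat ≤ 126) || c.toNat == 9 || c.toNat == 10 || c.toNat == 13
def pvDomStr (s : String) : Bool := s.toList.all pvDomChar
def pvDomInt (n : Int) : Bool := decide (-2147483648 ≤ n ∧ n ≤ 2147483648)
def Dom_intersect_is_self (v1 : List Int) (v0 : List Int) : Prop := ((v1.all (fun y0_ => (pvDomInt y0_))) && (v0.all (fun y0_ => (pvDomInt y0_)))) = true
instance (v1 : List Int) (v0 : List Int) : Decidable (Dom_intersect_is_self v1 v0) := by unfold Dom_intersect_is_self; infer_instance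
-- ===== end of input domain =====

-- B replaces A's two index sets and intersection-equality test by one lockstep
-- positional scan over v1 with an index into v0 (simpler decomposition, no sets).

-- ===== PORT A =====
def intersect_is_self (v1 : List Int) (v0 : List Int) : Bool :=
  let v0_indices := ((PySem.List.enumerate v0).filter (fun p => p.2 == 1)).map (·.1)
  let v1_indices := ((PySem.List.enumerate v1).filter (fun p => p.2 == 1)).map (·.1)
  let v0_set : PySem.Set Int := PySem.Set.ofList v0_indices
  let v1_set : PySem.Set Int := PySem.Set.ofList v1_indices
  if PySem.Set.equal v1_set (PySem.Set.inter v1_set v0_set) then true else false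

-- ===== PORT B =====
-- the 'for x in v1' loop with running index i and early return, as structural recursion
def intersect_is_self_alt_go (v0 : List Int) (n0 : Int) : Int → List Int → Bool
  | _, [] => true
  | i, x :: rest =>
    if x == 1 && (decide (i ≥ n0) || !(PySem.List.pyGet? v0 i == some 1)) then false
    else intersect_is_self_alt_go v0 n0 (i + 1) rest

def intersect_is_self_alt (v1 : List Int) (v0 : List Int) : Bool :=
  intersect_is_self_alt_go v0 (v0.length : Int) 0 v1

-- ===== PRECONDITION & SPEC =====
def Spec_intersect_is_self (v1 : List Int) (v0 : List Int) (out : Bool) : Prop := out = intersect_is_self_alt v1 v0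
instance (v1 : List Int) (v0 : List Int) (out : Bool) : Decidable (Spec_intersect_is_self v1 v0 out) := by unfold Spec_intersect_is_self; infer_instance

-- ===== CLAIM (what is proved, stated in full; the proofs are below) =====
def Claim_equal_intersect_is_self : Prop := ∀ (v1 : List Int) (v0 : List Int), Dom_intersect_is_self v1 v0 → Spec_intersect_is_self v1 v0 (intersect_is_self v1 v0)

-- ===== LEMMAS AND PROOFS =====

-- B's loop returns true iff every 1 in the remaining list (enumerated from i) sits at a
-- position that is in range of v0 and holds a 1 there.
theorem alt_go_eq_true_iff (v0 : List Int) (n0 : Int) (i : Int) (l : List Int) :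
    intersect_is_self_alt_go v0 n0 i l = true ↔
    ∀ p ∈ PySem.List.enumerate l i, p.2 = 1 → p.1 < n0 ∧ PySem.List.pyGet? v0 p.1 = some 1 := by
  induction l generalizing i with
  | nil => simp [intersect_is_self_alt_go, PySem.List.enumerate_nil]
  | cons x rest ih =>
    rw [intersect_is_self_alt_go, PySem.List.enumerate_cons]
    by_cases hbad : x = 1 ∧ (i ≥ n0 ∨ ¬ PySem.List.pyGet? v0 i = some 1)
    · have hc : (x == 1 && (decide (i ≥ n0) || !(PySem.List.pyGet? v0 i == some 1))) = true := by
        simp [hbad.1]; tauto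
      rw [if_pos hc]
      refine iff_of_false (by simp) fun h => ?_
      have := h (i, x) List.mem_cons_self hbad.1
      rcases hbad.2 with h' | h'
      · omega
      · exact h' this.2
    · have hc : (x == 1 && (decide (i ≥ n0) || !(PySem.List.pyGet? v0 i == some 1))) = false := by
        by_cases hx : x = 1
        · have := hbad; push Not at this
          obtain ⟨h1, h2⟩ := this hx
          simp [hx, h2]; omega
        · simp [hx]
      rw [if_neg (by simp [hc]), ih]
      constructor
      · intro h p hp
        rcases List.mem_cons.mp hp with rfl | hp'
        · intro h1
          by_cases hx : x = 1
          · have := hbad; push Not at this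
            obtain ⟨hlt, hget⟩ := this hx
            exact ⟨by omega, hget⟩
          · exact absurd h1 hx
        · exact h p hp'
      · intro h p hp; exact h p (List.mem_cons.mpr (Or.inr hp))

-- characterise pyGet? v0 i = some 1 (for indices from enumerate, i ≥ 0) as membership
-- in A's 1-index set of v0
theorem mem_v0set_iff (v0 : List Int) (i : Int) (hi : 0 ≤ i) :
    (i < (v0.length : Int) ∧ PySem.List.pyGet? v0 i = some 1) ↔
    (∃ p ∈ (PySem.List.enumerate v0).filter (fun p => p.2 == 1), p.1 = i) := by
  constructor
  · rintro ⟨hlt, hget⟩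
    lift i to ℕ using hi
    have hlen : i < v0.length := by exact_mod_cast hlt
    have hval : v0[i] = 1 := by
      rw [PySem.List.pyGet?_natCast, List.getElem?_eq_getElem hlen] at hget
      exact Option.some.inj hget
    refine ⟨((i : Int), v0[i]), ?_, rfl⟩
    rw [List.mem_filter]
    refine ⟨?_, by simp [hval]⟩
    rw [PySem.List.mem_enumerate_iff]
    exact ⟨i, hlen, by simp⟩
  · rintro ⟨p, hp, rfl⟩
    rw [List.mem_filter] at hp
    obtain ⟨hmem, hval⟩ := hp
    rw [PySem.List.mem_enumerate_iff] at hmem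
    obtain ⟨k, hk, hpk⟩ := hmem
    subst hpk
    simp only [beq_iff_eq] at hval
    constructor
    · simpa using (by exact_mod_cast hk : (k : Int) < (v0.length : Int))
    · simp only [zero_add]
      rw [PySem.List.pyGet?_natCast]
      simp [List.getElem?_eq_getElem hk, hval]

-- ===== VERDICT (by name: the statement is the Claim_ definition above) =====
theorem intersect_is_self_spec : Claim_equal_intersect_is_self := by
  intro v1 v0 _
  unfold Spec_intersect_is_self intersect_is_self intersect_is_self_alt
  rw [Bool.eq_iff_iff]
  rw [alt_go_eq_true_iff]
  simp only [Bool.if_true_left, Bool.or_false, decide_eq_true_eq,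
    PySem.Set.equal_iff, PySem.Set.mem_inter, PySem.Set.mem_ofList, List.mem_map]
  constructor
  · intro h p hp h1
    have hi : 0 ≤ p.1 := by
      rw [PySem.List.mem_enumerate_iff] at hp
      obtain ⟨k, hk, hpk⟩ := hp; subst hpk; simp
    rw [mem_v0set_iff v0 p.1 hi]
    have := (h p.1).mp ⟨p, List.mem_filter.mpr ⟨hp, by simp [h1]⟩, rfl⟩
    obtain ⟨_, q, hq, hq1⟩ := this
    exact ⟨q, hq, hq1⟩
  · intro h x
    constructor
    · rintro ⟨p, hp, rfl⟩
      rw [List.mem_filter] at hp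
      obtain ⟨hmem, hval⟩ := hp
      simp only [beq_iff_eq] at hval
      have hi : 0 ≤ p.1 := by
        rw [PySem.List.mem_enumerate_iff] at hmem
        obtain ⟨k, hk, hpk⟩ := hmem; subst hpk; simp
      refine ⟨⟨p, List.mem_filter.mpr ⟨hmem, by simp [hval]⟩, rfl⟩, ?_⟩
      exact (mem_v0set_iff v0 p.1 hi).mp (h p hmem hval)
    · exact And.left
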